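-- pv_equiv track=rewrite | github.com/thboutet292/STAGE_M2 | HMM_models/scripts/script_cluster_core.py | combined_dico
-- ===== SOURCE A (Python) =====
-- def combined_dico(clusters, supclusters):
-- 		for cluster, liste in clusters.items():
-- 				if len(liste) == 2:
-- 						for supcluster, gene_predits in supclusters.items():
-- 								if len(gene_predits) > 2 and liste[0] == gene_predits[2]:
-- 										clusters[cluster].append(gene_predits[0])
-- 										clusters[cluster].append(gene_predits[1])
-- 		return clusters
-- ===== SOURCE B (Python) =====
-- def combined_dico(clusters, supclusters):
--     index = {}
--     for gene_predits in supclusters.values():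
--         if len(gene_predits) > 2:
--             index.setdefault(gene_predits[2], []).extend(
--                 [gene_predits[0], gene_predits[1]])
--     for cluster, liste in clusters.items():
--         if len(liste) == 2:
--             liste.extend(index.get(liste[0], []))
--     return clusters
-- ===== Notes on version B (the rewrite author's own statement) =====
-- stated objective: alternative
-- what changed: B builds, in one pass over supclusters, an index from gene_predits[2] to the [gene_predits[0], gene_predits[1]] pairs to append, then extends each two-gene cluster by a single lookup, so supclusters is no longer rescanned per cluster.
import Mathlib
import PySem

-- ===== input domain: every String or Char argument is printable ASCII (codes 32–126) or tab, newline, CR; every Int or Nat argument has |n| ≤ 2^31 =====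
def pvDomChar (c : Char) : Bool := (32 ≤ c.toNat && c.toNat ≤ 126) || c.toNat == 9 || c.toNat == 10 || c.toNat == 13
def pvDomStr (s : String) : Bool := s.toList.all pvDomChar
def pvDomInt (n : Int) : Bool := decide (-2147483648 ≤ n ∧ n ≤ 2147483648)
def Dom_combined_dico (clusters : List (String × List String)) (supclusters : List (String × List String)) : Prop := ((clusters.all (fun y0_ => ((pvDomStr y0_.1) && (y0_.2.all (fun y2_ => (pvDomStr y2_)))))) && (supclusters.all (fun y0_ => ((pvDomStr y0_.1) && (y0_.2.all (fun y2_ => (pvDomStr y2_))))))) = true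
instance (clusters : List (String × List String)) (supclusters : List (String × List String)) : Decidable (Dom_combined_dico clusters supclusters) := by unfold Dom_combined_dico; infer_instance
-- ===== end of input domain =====

-- B replaces A's per-cluster rescan of supclusters with a one-pass index keyed by
-- gene_predits[2]. Both Pythons mutate `clusters` in place identically; the theorems
-- here are about the returned value.

-- ===== PORT A =====
-- clusters[cluster].append-style update: append v to the value of the FIRST entry with key k
def appendAt (m : List (String × List String)) (k : String) (v : List String) : List (String × List String) :=
  match m with
  | [] => []
  | (k', l) :: rest => if k' == k then (k', l ++ v) :: rest else (k', l) :: appendAt rest k v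

def combined_dico (clusters : List (String × List String)) (supclusters : List (String × List String)) : List (String × List String) :=
  clusters.foldl (fun acc cl =>
    if cl.2.length == 2 then
      supclusters.foldl (fun acc2 sp =>
        match sp.2 with
        | g0 :: g1 :: g2 :: _ =>
          -- len(gene_predits) > 2 and liste[0] == gene_predits[2]; two .append calls
          if PySem.List.pyGet? cl.2 0 == some g2 then
            appendAt (appendAt acc2 cl.1 [g0]) cl.1 [g1]
          else acc2
        | _ => acc2) acc
    else acc) clusters

-- ===== PORT B =====
-- index.setdefault(k, []).extend(v)
def bIndexAdd (idx : List (String × List String)) (k : String) (v : List String) : List (String × List String) :=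
  match idx with
  | [] => [(k, v)]
  | (k', l) :: rest => if k' == k then (k', l ++ v) :: rest else (k', l) :: bIndexAdd rest k v

-- index.get(k, [])
def bLookup (idx : List (String × List String)) (k : String) : List String :=
  match idx with
  | [] => []
  | (k', l) :: rest => if k' == k then l else bLookup rest k

def combined_dico_alt (clusters : List (String × List String)) (supclusters : List (String × List String)) : List (String × List String) :=
  let index := supclusters.foldl (fun idx sp =>
    if 2 < sp.2.length then
      -- the indices 0,1,2 are in range: len > 2 was just checked
      bIndexAdd idx (PySem.List.pyGetD sp.2 2 "") [PySem.List.pyGetD sp.2 0 "", PySem.List.pyGetD sp.2 1 ""]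
    else idx) []
  clusters.map (fun cl =>
    if cl.2.length == 2 then
      -- liste[0]: index 0 is in range, len == 2 was just checked
      (cl.1, cl.2 ++ bLookup index (PySem.List.pyGetD cl.2 0 ""))
    else cl)

-- ===== PRECONDITION & SPEC =====
-- `clusters` is a Python dict, whose keys are unique; Pre_ excludes association lists with
-- duplicate cluster keys, which no Python dict can produce.
def Pre_combined_dico (clusters : List (String × List String)) (supclusters : List (String × List String)) : Prop :=
  (clusters.map Prod.fst).Nodup
instance (clusters : List (String × List String)) (supclusters : List (String × List String)) : Decidable (Pre_combined_dico clusters supclusters) := by unfold Pre_combined_dico; infer_instance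

def pvWitness_combined_dico : (List (String × List String)) × (List (String × List String)) :=
  ([("c1", ["x", "y"]), ("c2", ["z"])], [("s1", ["p", "q", "x"])])

def Spec_combined_dico (clusters : List (String × List String)) (supclusters : List (String × List String)) (out : List (String × List String)) : Prop := out = combined_dico_alt clusters supclusters
instance (clusters : List (String × List String)) (supclusters : List (String × List String)) (out : List (String × List String)) : Decidable (Spec_combined_dico clusters supclusters out) := by unfold Spec_combined_dico; infer_instance

-- ===== CLAIM (what is proved, stated in full; the proofs are below) =====
def Claim_equal_combined_dico : Prop := ∀ (clusters : List (String × List String)) (supclusters : List (String × List String)), Dom_combined_dico clusters supclusters → Pre_combined_dico clusters supclusters → Spec_combined_dico clusters supclusters (combined_dico clusters supclusters)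

-- ===== LEMMAS AND PROOFS =====

-- contribution of one supcluster entry to the cluster whose first gene is `a`
def delta (a : String) (sp : String × List String) : List String :=
  match sp.2 with
  | g0 :: g1 :: g2 :: _ => if a == g2 then [g0, g1] else []
  | _ => []

theorem appendAt_nil_val (m : List (String × List String)) (k : String) :
    appendAt m k [] = m := by
  induction m with
  | nil => rfl
  | cons h t ih =>
    obtain ⟨k', l⟩ := h
    by_cases hk : k' == k
    · simp [appendAt, hk]
    · simp [appendAt, hk, ih]

theorem appendAt_appendAt (m : List (String × List String)) (k : String) (v1 v2 : List String) :
    appendAt (appendAt m k v1) k v2 = appendAt m k (v1 ++ v2) := by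
  induction m with
  | nil => rfl
  | cons h t ih =>
    obtain ⟨k', l⟩ := h
    by_cases hk : k' == k
    · simp [appendAt, hk, List.append_assoc]
    · simp [appendAt, hk, ih]

theorem inner_fold_eq (sc : List (String × List String)) (c a b : String)
    (acc : List (String × List String)) :
    sc.foldl (fun acc2 sp =>
        match sp.2 with
        | g0 :: g1 :: g2 :: _ =>
          if PySem.List.pyGet? [a, b] 0 == some g2 then
            appendAt (appendAt acc2 c [g0]) c [g1]
          else acc2
        | _ => acc2) acc
      = appendAt acc c (sc.flatMap (delta a)) := by
  induction sc generalizing acc with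
  | nil => simp [appendAt_nil_val]
  | cons sp t ih =>
    obtain ⟨sk, gp⟩ := sp
    match gp with
    | [] => simpa [delta] using ih acc
    | [g0] => simpa [delta] using ih acc
    | [g0, g1] => simpa [delta] using ih acc
    | g0 :: g1 :: g2 :: rest =>
      by_cases hcond : a = g2
      · have h0 : (PySem.List.pyGet? [a, b] 0 == some g2) = true := by simp [hcond]
        have hd : delta a (sk, g0 :: g1 :: g2 :: rest) = [g0, g1] := by simp [delta, hcond]
        simp only [List.foldl_cons, List.flatMap_cons, hd]
        rw [if_pos h0, ih, appendAt_appendAt, appendAt_appendAt]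
        rfl
      · have h0 : ¬((PySem.List.pyGet? [a, b] 0 == some g2) = true) := by simp [hcond]
        have hd : delta a (sk, g0 :: g1 :: g2 :: rest) = [] := by simp [delta, hcond]
        simp only [List.foldl_cons, List.flatMap_cons, hd, List.nil_append]
        rw [if_neg h0]
        exact ih acc

theorem bLookup_bIndexAdd (idx : List (String × List String)) (k a : String) (v : List String) :
    bLookup (bIndexAdd idx k v) a = bLookup idx a ++ (if a == k then v else []) := by
  induction idx with
  | nil =>
    by_cases h : k = a
    · subst h; simp [bIndexAdd, bLookup]
    · simp [bIndexAdd, bLookup, h, Ne.symm h]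
  | cons hd t ih =>
    obtain ⟨k', l⟩ := hd
    by_cases h1 : k' = k
    · subst h1
      by_cases h2 : k' = a
      · subst h2; simp [bIndexAdd, bLookup]
      · simp [bIndexAdd, bLookup, h2, Ne.symm h2]
    · by_cases h2 : k' = a
      · subst h2; simp [bIndexAdd, bLookup, h1]
      · simp [bIndexAdd, bLookup, h1, h2, ih]

theorem index_fold_eq (sc : List (String × List String)) (idx : List (String × List String)) (a : String) :
    bLookup (sc.foldl (fun idx sp =>
        if 2 < sp.2.length then
          bIndexAdd idx (PySem.List.pyGetD sp.2 2 "") [PySem.List.pyGetD sp.2 0 "", PySem.List.pyGetD sp.2 1 ""]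
        else idx) idx) a
      = bLookup idx a ++ sc.flatMap (delta a) := by
  induction sc generalizing idx with
  | nil => simp
  | cons sp t ih =>
    obtain ⟨sk, gp⟩ := sp
    match gp with
    | [] => simpa [delta] using ih idx
    | [g0] => simpa [delta] using ih idx
    | [g0, g1] => simpa [delta] using ih idx
    | g0 :: g1 :: g2 :: rest =>
      have hlen : 2 < (g0 :: g1 :: g2 :: rest).length := by simp
      have hg0 : PySem.List.pyGetD (g0 :: g1 :: g2 :: rest) 0 "" = g0 := by
        simp [PySem.List.pyGetD, PySem.List.pyGet?, PySem.List.pyIdx?,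
          show (0:Int) ≤ (rest.length:Int) + 1 + 1 from by omega]
      have hg1 : PySem.List.pyGetD (g0 :: g1 :: g2 :: rest) 1 "" = g1 := by
        simp [PySem.List.pyGetD, PySem.List.pyGet?, PySem.List.pyIdx?,
          show (0:Int) ≤ (rest.length:Int) + 1 from by omega]
      have hg2 : PySem.List.pyGetD (g0 :: g1 :: g2 :: rest) 2 "" = g2 := by
        simp [PySem.List.pyGetD, PySem.List.pyGet?, PySem.List.pyIdx?,
          show (2:Int) ≤ (rest.length:Int) + 1 + 1 from by omega]
      simp only [List.foldl_cons, List.flatMap_cons, if_pos hlen, hg0, hg1, hg2]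
      rw [ih, bLookup_bIndexAdd]
      simp [delta, List.append_assoc]

-- the value appended to cluster cl by A's whole inner loop
def gAdd (sc : List (String × List String)) (cl : String × List String) : List String :=
  match cl.2 with
  | [a, _] => sc.flatMap (delta a)
  | _ => []

theorem appendAt_prefix (p m : List (String × List String)) (k : String) (v : List String)
    (hk : k ∉ p.map Prod.fst) :
    appendAt (p ++ m) k v = p ++ appendAt m k v := by
  induction p with
  | nil => rfl
  | cons hd t ih =>
    obtain ⟨k', l⟩ := hd
    have h1 : k' ≠ k := by intro h; exact hk (by simp [h])
    have h2 : k ∉ t.map Prod.fst := by intro h; exact hk (by simp [h])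
    simp [appendAt, h1, ih h2]

theorem step_eq_appendAt (sc : List (String × List String)) (cl : String × List String)
    (acc : List (String × List String)) :
    (if cl.2.length == 2 then
      sc.foldl (fun acc2 sp =>
        match sp.2 with
        | g0 :: g1 :: g2 :: _ =>
          if PySem.List.pyGet? cl.2 0 == some g2 then
            appendAt (appendAt acc2 cl.1 [g0]) cl.1 [g1]
          else acc2
        | _ => acc2) acc
    else acc) = appendAt acc cl.1 (gAdd sc cl) := by
  obtain ⟨c, l⟩ := cl
  match l with
  | [] => simp [gAdd, appendAt_nil_val]
  | [a] => simp [gAdd, appendAt_nil_val]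
  | [a, b] => simpa [gAdd] using inner_fold_eq sc c a b acc
  | a :: b :: x :: rest => simp [gAdd, appendAt_nil_val]

theorem outer_fold_eq (sc : List (String × List String)) (cs p : List (String × List String))
    (hnd : ((p ++ cs).map Prod.fst).Nodup) :
    cs.foldl (fun acc cl => appendAt acc cl.1 (gAdd sc cl)) (p ++ cs)
      = p ++ cs.map (fun cl => (cl.1, cl.2 ++ gAdd sc cl)) := by
  induction cs generalizing p with
  | nil => simp
  | cons cl t ih =>
    obtain ⟨c, l⟩ := cl
    have hnd' : (p.map Prod.fst ++ c :: t.map Prod.fst).Nodup := by simpa using hnd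
    have hcp : c ∉ p.map Prod.fst := fun hc =>
      List.disjoint_of_nodup_append hnd' hc (List.mem_cons_self)
    simp only [List.foldl_cons]
    rw [appendAt_prefix p ((c, l) :: t) c (gAdd sc (c, l)) hcp]
    have hstep : appendAt ((c, l) :: t) c (gAdd sc (c, l)) = (c, l ++ gAdd sc (c, l)) :: t := by
      simp [appendAt]
    rw [hstep]
    have hrearr : p ++ (c, l ++ gAdd sc (c, l)) :: t = (p ++ [(c, l ++ gAdd sc (c, l))]) ++ t := by
      simp
    rw [hrearr, ih (p ++ [(c, l ++ gAdd sc (c, l))]) (by simpa using hnd)]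
    simp

-- ===== VERDICT (by name: the statement is the Claim_ definition above) =====
theorem combined_dico_spec : Claim_equal_combined_dico := by
  intro clusters supclusters _ hpre
  unfold Spec_combined_dico combined_dico combined_dico_alt
  have hA : clusters.foldl (fun acc cl =>
      if cl.2.length == 2 then
        supclusters.foldl (fun acc2 sp =>
          match sp.2 with
          | g0 :: g1 :: g2 :: _ =>
            if PySem.List.pyGet? cl.2 0 == some g2 then
              appendAt (appendAt acc2 cl.1 [g0]) cl.1 [g1]
            else acc2
          | _ => acc2) acc
      else acc) clusters
      = clusters.map (fun cl => (cl.1, cl.2 ++ gAdd supclusters cl)) := by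
    have hcongr : clusters.foldl (fun acc cl =>
        if cl.2.length == 2 then
          supclusters.foldl (fun acc2 sp =>
            match sp.2 with
            | g0 :: g1 :: g2 :: _ =>
              if PySem.List.pyGet? cl.2 0 == some g2 then
                appendAt (appendAt acc2 cl.1 [g0]) cl.1 [g1]
              else acc2
            | _ => acc2) acc
        else acc) clusters
        = clusters.foldl (fun acc cl => appendAt acc cl.1 (gAdd supclusters cl)) clusters := by
      apply PySem.List.foldl_congr_mem
      intro acc cl _
      exact step_eq_appendAt supclusters cl acc
    rw [hcongr]
    simpa using outer_fold_eq supclusters clusters [] (by simpa using hpre)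
  rw [hA]
  apply List.map_congr_left
  intro cl _
  obtain ⟨c, l⟩ := cl
  match l with
  | [] => simp [gAdd]
  | [a] => simp [gAdd]
  | [a, b] =>
    have hk : PySem.List.pyGetD ([a, b] : List String) 0 "" = a := by
      simp [PySem.List.pyGetD, PySem.List.pyGet?, PySem.List.pyIdx?]
    simp [gAdd, hk, index_fold_eq supclusters [] a, bLookup]
  | a :: b :: x :: rest => simp [gAdd]
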